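-- pv_equiv track=rewrite | github.com/ViraKrajevskiy/Python-tasks | 18/118.py | array_118
-- ===== SOURCE A (Python) =====
-- def array_118(array):
--     result = []
--     current_series = []
--     previous_value = None
--
--     for element in array:
--         if element == previous_value:
--             current_series.append(element)
--         else:
--             if current_series:
--                 result.extend(current_series)
--                 result.append(0)
--             current_series = [element]
--         previous_value = element
--
--     if current_series:
--         result.extend(current_series)
--         result.append(0)
--
--     return result
-- ===== SOURCE B (Python) =====
-- def array_118(array):
--     result = []
--     n = len(array)
--     for i, x in enumerate(array):
--         result.append(x)
--         if i + 1 == n or x != array[i + 1]: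
--             result.append(0)
--     return result
-- ===== Notes on version B (the rewrite author's own statement) =====
-- stated objective: simpler
-- what changed: Replaced A's buffered run accumulator (current_series/previous_value state machine with a post-loop flush) by a direct one-element-lookahead recursion that emits each element immediately and a 0 at each run boundary, keeping no buffer.
import Mathlib
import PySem

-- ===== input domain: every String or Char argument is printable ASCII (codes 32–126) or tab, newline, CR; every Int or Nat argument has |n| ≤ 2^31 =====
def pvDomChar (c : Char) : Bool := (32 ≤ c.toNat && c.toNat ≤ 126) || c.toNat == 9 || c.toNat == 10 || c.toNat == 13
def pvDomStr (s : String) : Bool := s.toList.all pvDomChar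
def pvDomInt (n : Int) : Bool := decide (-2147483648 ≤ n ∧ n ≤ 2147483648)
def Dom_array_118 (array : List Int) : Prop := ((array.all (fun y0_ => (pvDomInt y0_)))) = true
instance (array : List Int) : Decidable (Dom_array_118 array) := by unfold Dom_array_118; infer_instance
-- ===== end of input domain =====

-- B replaces A's buffered run accumulator (current_series/previous_value state machine with a
-- post-loop flush) by a bufferless one-element-lookahead scan over enumerate (objective: simpler).

-- ===== PORT A =====
-- state = (result, current_series, previous_value)
def aStep_array_118 (st : List Int × List Int × Option Int) (element : Int) :
    List Int × List Int × Option Int :=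
  let (result, current_series, previous_value) := st
  if (some element) == previous_value then
    (result, current_series ++ [element], some element)
  else if current_series.isEmpty then
    (result, [element], some element)
  else
    (result ++ current_series ++ [0], [element], some element)

def array_118 (array : List Int) : List Int :=
  let st := array.foldl aStep_array_118 ([], [], none)
  if st.2.1.isEmpty then st.1 else st.1 ++ st.2.1 ++ [0]

-- ===== PORT B =====
-- loop body: append x; append 0 if i is the last index or the lookahead array[i+1] differs.
-- 'x != array[i+1]' is ported as inequality with pyGet? (pyGet? = some array[i+1] exactly when
-- i+1 is in range; the short-circuit 'i + 1 == n' covers the only out-of-range case, as in Python).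
def bStep_array_118 (array : List Int) (result : List Int) (ix : Int × Int) : List Int :=
  let result := result ++ [ix.2]
  if (ix.1 + 1 == (array.length : Int)) || !(PySem.List.pyGet? array (ix.1 + 1) == some ix.2) then
    result ++ [0]
  else
    result

def array_118_alt (array : List Int) : List Int :=
  (PySem.List.enumerate array).foldl (bStep_array_118 array) []

-- ===== PRECONDITION & SPEC =====
def Spec_array_118 (array : List Int) (out : List Int) : Prop := out = array_118_alt array
instance (array : List Int) (out : List Int) : Decidable (Spec_array_118 array out) := by unfold Spec_array_118; infer_instance

-- ===== CLAIM (what is proved, stated in full; the proofs are below) =====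
def Claim_equal_array_118 : Prop := ∀ (array : List Int), Dom_array_118 array → Spec_array_118 array (array_118 array)

-- ===== LEMMAS AND PROOFS =====
-- the common run-boundary view both ports are reduced to
def runsView_array_118 (x : Int) (rest : List Int) : List Int :=
  match rest with
  | [] => [x, 0]
  | y :: ys =>
    if x ≠ y then [x, 0] ++ runsView_array_118 y ys else [x] ++ runsView_array_118 y ys

def finish_array_118 (st : List Int × List Int × Option Int) : List Int :=
  if st.2.1.isEmpty then st.1 else st.1 ++ st.2.1 ++ [0]

theorem foldl_runs_A (rest : List Int) :
    ∀ (x : Int) (res cur : List Int),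
      finish_array_118 (rest.foldl aStep_array_118 (res, cur ++ [x], some x)) =
        res ++ cur ++ runsView_array_118 x rest := by
  induction rest with
  | nil =>
    intro x res cur
    simp [finish_array_118, runsView_array_118]
  | cons e rest' ih =>
    intro x res cur
    by_cases h : e = x
    · subst h
      have : aStep_array_118 (res, cur ++ [e], some e) e = (res, (cur ++ [e]) ++ [e], some e) := by
        simp [aStep_array_118]
      simp only [List.foldl_cons, this, ih e res (cur ++ [e]), runsView_array_118]
      simp
    · have : aStep_array_118 (res, cur ++ [x], some x) e =
          (res ++ (cur ++ [x]) ++ [0], [e], some e) := by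
        simp [aStep_array_118, h]
      have h2 := ih e (res ++ (cur ++ [x]) ++ [0]) []
      simp only [List.nil_append] at h2
      simp only [List.foldl_cons, this, h2, runsView_array_118]
      simp [Ne.symm h]

theorem A_eq_runs (x : Int) (xs : List Int) :
    array_118 (x :: xs) = runsView_array_118 x xs := by
  have h1 : aStep_array_118 ([], [], none) x = ([], [] ++ [x], some x) := by
    simp [aStep_array_118]
  calc array_118 (x :: xs)
      = finish_array_118 ((x :: xs).foldl aStep_array_118 ([], [], none)) := rfl
    _ = finish_array_118 (xs.foldl aStep_array_118 ([], [] ++ [x], some x)) := by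
          simp only [List.foldl_cons, h1]
    _ = runsView_array_118 x xs := by simpa using foldl_runs_A xs x [] []

theorem foldl_runs_B (xs : List Int) :
    ∀ (x : Int) (pre res : List Int),
      (PySem.List.enumerate (x :: xs) (pre.length : Int)).foldl
          (bStep_array_118 (pre ++ x :: xs)) res =
        res ++ runsView_array_118 x xs := by
  induction xs with
  | nil =>
    intro x pre res
    simp [PySem.List.enumerate_cons, bStep_array_118, runsView_array_118]
  | cons y ys ih =>
    intro x pre res
    have hlen : ¬ ((pre.length : Int) + 1 = ((pre ++ x :: y :: ys).length : Int)) := by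
      simp; omega
    have hget : PySem.List.pyGet? (pre ++ x :: y :: ys) ((pre.length : Int) + 1) = some y := by
      have := PySem.List.pyGet?_append_right (pre := pre) (ys := x :: y :: ys) (k := 1)
      simpa using this
    have hstep : bStep_array_118 (pre ++ x :: y :: ys) res ((pre.length : Int), x) =
        (if x ≠ y then res ++ [x, 0] else res ++ [x]) := by
      by_cases hxy : x = y
      · subst hxy
        simp [bStep_array_118, hget]
        omega
      · simp [bStep_array_118, hget, hxy, Ne.symm hxy]
    have hcast : (pre.length : Int) + 1 = (((pre ++ [x]).length : Nat) : Int) := by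
      simp
    have harr : pre ++ x :: y :: ys = (pre ++ [x]) ++ y :: ys := by simp
    have hih := ih y (pre ++ [x]) (if x ≠ y then res ++ [x, 0] else res ++ [x])
    rw [PySem.List.enumerate_cons, List.foldl_cons, hstep, hcast, harr, hih]
    by_cases hxy : x = y
    · subst hxy
      simp [runsView_array_118]
    · simp [runsView_array_118, hxy]

theorem B_eq_runs (x : Int) (xs : List Int) :
    array_118_alt (x :: xs) = runsView_array_118 x xs := by
  have := foldl_runs_B xs x [] []
  simpa [array_118_alt] using this

-- ===== VERDICT (by name: the statement is the Claim_ definition above) =====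
theorem array_118_spec : Claim_equal_array_118 := by
  intro array _
  unfold Spec_array_118
  cases array with
  | nil => rfl
  | cons x xs => rw [A_eq_runs, B_eq_runs]
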